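-- pv_equiv track=rewrite | github.com/revjkee/aethernova | core-systems/cybersecurity-core/tests/load/test_scan_throughput.py | _gen_targets
-- ===== SOURCE A (Python) =====
-- from typing import Any, Awaitable, Callable, Dict, Iterable, List, Optional, Sequence, Tuple
--
-- def _gen_targets(n: int) -> List[str]:
--     # Детерминированный список IPv4 внутри RFC1918 для теста.
--     # 172.20.0.0/16
--     base_a, base_b = 172, 20
--     out: List[str] = []
--     x, y = 0, 1
--     for _ in range(n):
--         # простой, но детерминированный перебор
--         oct3 = (x % 254) + 1
--         oct4 = (y % 254) + 1
--         out.append(f"{base_a}.{base_b}.{oct3}.{oct4}")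
--         x += 1
--         y += 3
--     return out
-- ===== SOURCE B (Python) =====
-- from typing import List
--
-- def _gen_targets(n: int) -> List[str]:
--     # The (oct3, oct4) pairs repeat with period 254 (both counters are taken
--     # mod 254 and gcd(3, 254) = 1 is irrelevant: each component alone has
--     # period 254).  So format one full cycle of 254 strings once, then tile
--     # it and cut to length n -- no per-element formatting.
--     cycle = [f"172.20.{(x % 254) + 1}.{((1 + 3 * x) % 254) + 1}" for x in range(254)]
--     if n <= 0:
--         return []
--     reps = -(-n // 254)  # ceil(n / 254)
--     return (cycle * reps)[:n]
-- ===== Notes on version B (the rewrite author's own statement) =====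
-- stated objective: faster
-- what changed: Exploits that the octet sequence is periodic with period 254: B formats one 254-entry cycle once, then tiles it ceil(n/254) times and truncates to n, instead of A's per-iteration counter updates and string formatting.
import Mathlib
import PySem

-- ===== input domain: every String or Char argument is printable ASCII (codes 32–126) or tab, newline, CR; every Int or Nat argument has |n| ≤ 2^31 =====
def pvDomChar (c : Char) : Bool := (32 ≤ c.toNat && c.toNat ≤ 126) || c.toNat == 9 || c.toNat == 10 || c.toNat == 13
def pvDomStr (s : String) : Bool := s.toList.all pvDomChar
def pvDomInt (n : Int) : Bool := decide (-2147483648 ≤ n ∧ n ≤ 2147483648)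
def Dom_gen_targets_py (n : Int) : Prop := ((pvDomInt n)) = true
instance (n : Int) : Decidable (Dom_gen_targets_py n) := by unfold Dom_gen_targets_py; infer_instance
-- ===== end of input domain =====

-- B exploits the period-254 repetition of the octet pairs: one formatted 254-entry cycle, tiled and cut to n (measurably faster by constant factor).


-- ===== PORT A =====
def pvFmt (o3 o4 : Int) : String :=
  "172.20." ++ PySem.Int.toStr o3 ++ "." ++ PySem.Int.toStr o4

def gen_targets_py (n : Int) : List String :=
  -- out, x, y accumulated exactly as in A's loop
  ((PySem.List.pyRange 0 n 1).foldl
    (fun (st : List String × Int × Int) _ =>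
      let out := st.1; let x := st.2.1; let y := st.2.2
      (out ++ [pvFmt ((PySem.Int.mod x 254) + 1) ((PySem.Int.mod y 254) + 1)], x + 1, y + 3))
    ([], 0, 1)).1

-- ===== PORT B =====
def gen_targets_py_alt (n : Int) : List String :=
  -- cycle = one full period of 254 formatted strings (the comprehension over range(254))
  let cycle := (PySem.List.pyRange 0 254 1).map
    (fun x => pvFmt ((PySem.Int.mod x 254) + 1) ((PySem.Int.mod (1 + 3 * x) 254) + 1))
  if n ≤ 0 then []
  else
    let reps := -(PySem.Int.floordiv (-n) 254)   -- ceil(n / 254)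
    -- (cycle * reps)[:n] : with n > 0 the slice [:n] is exactly take n
    (List.flatten (List.replicate reps.toNat cycle)).take n.toNat

-- ===== PRECONDITION & SPEC =====
def Spec_gen_targets_py (n : Int) (out : List String) : Prop := out = gen_targets_py_alt n
instance (n : Int) (out : List String) : Decidable (Spec_gen_targets_py n out) := by unfold Spec_gen_targets_py; infer_instance

-- ===== CLAIM (what is proved, stated in full; the proofs are below) =====
def Claim_equal_gen_targets_py : Prop := ∀ (n : Int), Dom_gen_targets_py n → Spec_gen_targets_py n (gen_targets_py n)

-- ===== LEMMAS AND PROOFS =====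

-- the strings for m consecutive indices starting at x (closed form of both programs)
def pvTail (x : Int) (m : Nat) : List String :=
  (List.range m).map
    (fun (k : Nat) => pvFmt ((PySem.Int.mod (x + k) 254) + 1) ((PySem.Int.mod (1 + 3 * (x + k)) 254) + 1))

theorem pvTail_length (x : Int) (m : Nat) : (pvTail x m).length = m := by
  simp [pvTail]

theorem pvTail_succ (x : Int) (m : Nat) :
    pvTail x (m + 1)
      = pvFmt ((PySem.Int.mod x 254) + 1) ((PySem.Int.mod (1 + 3 * x) 254) + 1) :: pvTail (x + 1) m := by
  unfold pvTail
  rw [List.range_succ_eq_map, List.map_cons, List.map_map]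
  congr 1
  · norm_num
  apply List.map_congr_left
  intro k _
  simp only [Function.comp]
  have h : x + (k.succ : Int) = x + 1 + (k : Int) := by push_cast; ring
  rw [h]

-- split a tail at any point
theorem pvTail_add (x : Int) (a b : Nat) :
    pvTail x (a + b) = pvTail x a ++ pvTail (x + a) b := by
  induction a generalizing x with
  | zero => simp [pvTail]
  | succ a ih =>
    have h1 : a + 1 + b = (a + b) + 1 := by omega
    rw [h1, pvTail_succ, pvTail_succ, ih]
    simp only [List.cons_append]
    congr 2
    push_cast; ring_nf

-- periodicity: shifting the start by 254 changes nothing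
theorem pvTail_period (x : Int) (m : Nat) : pvTail (x + 254) m = pvTail x m := by
  unfold pvTail
  apply List.map_congr_left
  intro k _
  have h3 : PySem.Int.mod (x + 254 + k) 254 = PySem.Int.mod (x + k) 254 := by
    rw [PySem.Int.mod_eq_emod_of_pos (by norm_num), PySem.Int.mod_eq_emod_of_pos (by norm_num)]
    omega
  have h4 : PySem.Int.mod (1 + 3 * (x + 254 + k)) 254 = PySem.Int.mod (1 + 3 * (x + k)) 254 := by
    rw [PySem.Int.mod_eq_emod_of_pos (by norm_num), PySem.Int.mod_eq_emod_of_pos (by norm_num)]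
    have : 1 + 3 * (x + 254 + k) = (1 + 3 * (x + k)) + 3 * 254 := by ring
    rw [this]; omega
  rw [h3, h4]

-- B's cycle list is exactly one period
theorem pvCycle_eq :
    (PySem.List.pyRange 0 254 1).map
      (fun x => pvFmt ((PySem.Int.mod x 254) + 1) ((PySem.Int.mod (1 + 3 * x) 254) + 1))
    = pvTail 0 254 := by
  rw [PySem.List.pyRange_one]
  unfold pvTail
  norm_num [List.map_map]
  apply List.map_congr_left
  intro k _
  simp [Function.comp]

-- tiling the cycle r times is the tail of length r*254
theorem pvFlatten_replicate (r : Nat) :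
    List.flatten (List.replicate r (pvTail 0 254)) = pvTail 0 (r * 254) := by
  induction r with
  | zero => simp [pvTail]
  | succ r ih =>
    rw [List.replicate_succ, List.flatten_cons, ih]
    have h : (r + 1) * 254 = 254 + r * 254 := by ring
    rw [h, pvTail_add 0 254 (r * 254)]
    congr 1
    rw [show (0 : Int) + (254 : Nat) = 0 + 254 by norm_num, pvTail_period]

-- loop invariant: starting from (out, x, 1+3*x), A's fold appends pvTail x (length l)
theorem pvFold_inv (l : List Int) : ∀ (out : List String) (x : Int),
    (l.foldl
      (fun (st : List String × Int × Int) _ =>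
        let o := st.1; let a := st.2.1; let b := st.2.2
        (o ++ [pvFmt ((PySem.Int.mod a 254) + 1) ((PySem.Int.mod b 254) + 1)], a + 1, b + 3))
      (out, x, 1 + 3 * x)).1
    = out ++ pvTail x l.length := by
  induction l with
  | nil => intro out x; simp [pvTail]
  | cons h t ih =>
    intro out x
    simp only [List.foldl_cons, List.length_cons]
    rw [show (1 + 3 * x + 3) = 1 + 3 * (x + 1) by ring, ih, pvTail_succ]
    simp

-- ===== VERDICT (by name: the statement is the Claim_ definition above) =====
theorem gen_targets_py_spec : Claim_equal_gen_targets_py := by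
  intro n _
  unfold Spec_gen_targets_py gen_targets_py gen_targets_py_alt
  rw [show ((0:Int), (1:Int)) = ((0:Int), 1 + 3 * 0) by norm_num]
  rw [pvFold_inv, PySem.List.length_pyRange_one, List.nil_append, pvCycle_eq]
  by_cases hn : n ≤ 0
  · simp [hn, pvTail]
  · simp only [hn, if_false]
    set reps := -(PySem.Int.floordiv (-n) 254) with hreps
    have hr : n ≤ reps * 254 := by
      have h := PySem.Int.floordiv_mul_add_mod (-n) 254
      have hm := PySem.Int.mod_eq_emod_of_pos (a := -n) (show (0:Int) < 254 by norm_num)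
      rw [hm] at h
      have : 0 ≤ (-n) % 254 := Int.emod_nonneg _ (by norm_num)
      omega
    have hle : n.toNat ≤ reps.toNat * 254 := by omega
    rw [pvFlatten_replicate]
    have hsplit : reps.toNat * 254 = n.toNat + (reps.toNat * 254 - n.toNat) := by omega
    rw [hsplit, pvTail_add, List.take_append_of_le_length (by rw [pvTail_length]),
        List.take_of_length_le (by rw [pvTail_length])]
    congr 1
    omega
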